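-- pv_equiv track=rewrite | github.com/ksng-gh/programming-challenges | Advent-of-Code/2021/Day8/Day8.py | isInSegment
-- ===== SOURCE A (Python) =====
-- def isInSegment(retseg, otherseg):
--     start = 0
--     stop = len(otherseg)
--     for item in otherseg:
--         if item in retseg:
--             start += 1
--         if start == stop:
--             return True
--     return False
-- ===== SOURCE B (Python) =====
-- def isInSegment(retseg, otherseg):
--     if not otherseg:
--         return False
--     missing = set(otherseg)
--     for c in retseg:
--         missing.discard(c)
--         if not missing:
--             return True
--     return False
-- ===== Notes on version B (the rewrite author's own statement) =====
-- stated objective: alternative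
-- what changed: Inverted the traversal: instead of A's loop over otherseg with a match counter and a membership scan of retseg per character, B does a single pass over retseg, shrinking a set of still-missing otherseg characters and returning True as soon as it empties.
import Mathlib
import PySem

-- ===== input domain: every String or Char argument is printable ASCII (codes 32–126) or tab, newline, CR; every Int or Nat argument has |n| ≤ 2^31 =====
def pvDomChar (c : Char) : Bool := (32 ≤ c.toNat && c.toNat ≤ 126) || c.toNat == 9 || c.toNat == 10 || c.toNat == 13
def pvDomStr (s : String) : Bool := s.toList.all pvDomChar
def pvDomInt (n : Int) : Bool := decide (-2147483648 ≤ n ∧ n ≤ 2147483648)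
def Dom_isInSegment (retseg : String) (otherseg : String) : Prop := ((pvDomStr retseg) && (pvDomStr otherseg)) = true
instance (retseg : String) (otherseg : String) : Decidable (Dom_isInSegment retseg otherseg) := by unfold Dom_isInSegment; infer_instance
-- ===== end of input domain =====

-- B inverts the traversal (one pass over retseg shrinking a set of still-missing otherseg chars); alternative decomposition, no speed claim.

-- ===== PORT A =====
-- loop of A: counter 'start', target 'stop', early True when start == stop
def isInSegLoopA (retseg : List Char) (start stop : Int) : List Char → Bool
  | [] => false
  | item :: rest =>
    let start' := if retseg.contains item then start + 1 else start
    if start' == stop then true else isInSegLoopA retseg start' stop rest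

def isInSegment (retseg : String) (otherseg : String) : Bool :=
  isInSegLoopA retseg.toList 0 (otherseg.toList.length : Int) otherseg.toList

-- ===== PORT B =====
-- B's loop over retseg: discard each char from 'missing', early True when missing empties
def isInSegLoopB (missing : PySem.Set Char) : List Char → Bool
  | [] => false
  | c :: rest =>
    let m := PySem.Set.discard missing c
    if m.isEmpty then true else isInSegLoopB m rest

def isInSegment_alt (retseg : String) (otherseg : String) : Bool :=
  if otherseg.toList.isEmpty then false
  else isInSegLoopB (PySem.Set.ofList otherseg.toList) retseg.toList

-- ===== PRECONDITION & SPEC =====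
def Spec_isInSegment (retseg : String) (otherseg : String) (out : Bool) : Prop := out = isInSegment_alt retseg otherseg
instance (retseg : String) (otherseg : String) (out : Bool) : Decidable (Spec_isInSegment retseg otherseg out) := by unfold Spec_isInSegment; infer_instance

-- ===== CLAIM (what is proved, stated in full; the proofs are below) =====
def Claim_equal_isInSegment : Prop := ∀ (retseg : String) (otherseg : String), Dom_isInSegment retseg otherseg → Spec_isInSegment retseg otherseg (isInSegment retseg otherseg)

-- ===== LEMMAS AND PROOFS =====

-- A-side: if the target exceeds start plus the remaining length, the loop never hits it
theorem isInSegLoopA_false (retseg : List Char) (l : List Char) (start stop : Int)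
    (h : start + l.length < stop) : isInSegLoopA retseg start stop l = false := by
  induction l generalizing start with
  | nil => rfl
  | cons c rest ih =>
    have hlen : ((c :: rest).length : Int) = (rest.length : Int) + 1 := by simp
    simp only [isInSegLoopA]
    rw [hlen] at h
    have hne : ((if retseg.contains c then start + 1 else start) == stop) = false := by
      split <;> (rw [beq_eq_false_iff_ne]; omega)
    rw [hne]
    simp only [Bool.false_eq_true, if_false]
    split <;> exact ih _ (by omega)

-- A-side loop characterisation when the target is exactly start + remaining length
theorem isInSegLoopA_char (retseg : List Char) (l : List Char) (start : Int) :
    isInSegLoopA retseg start (start + l.length) l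
      = (!l.isEmpty && l.all retseg.contains) := by
  induction l generalizing start with
  | nil => rfl
  | cons c rest ih =>
    have hlen : ((c :: rest).length : Int) = (rest.length : Int) + 1 := by simp
    simp only [isInSegLoopA, hlen, List.isEmpty_cons, Bool.not_false, Bool.true_and,
      List.all_cons]
    by_cases hc : retseg.contains c
    · simp only [hc, if_pos, Bool.true_and]
      by_cases hr : rest = []
      · subst hr; simp
      · have hlenpos : (1 : Int) ≤ rest.length := by
          have := List.length_pos_iff.mpr hr; omega
        have hcond : ((start + 1) == start + ((rest.length : Int) + 1)) = false := by
          rw [beq_eq_false_iff_ne]; omega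
        rw [hcond]
        simp only [Bool.false_eq_true, if_false]
        have heq : start + ((rest.length : Int) + 1) = (start + 1) + rest.length := by omega
        rw [heq, ih (start + 1)]
        simp [hr]
    · have hcFalse : retseg.contains c = false := by simpa using hc
      simp only [hcFalse, Bool.false_eq_true, if_false, Bool.false_and]
      have hcond : (start == start + ((rest.length : Int) + 1)) = false := by
        rw [beq_eq_false_iff_ne]; omega
      rw [hcond]
      simp only [Bool.false_eq_true, if_false]
      exact isInSegLoopA_false retseg rest start _ (by omega)

-- B-side loop characterisation: for a nonempty missing-set the loop succeeds
-- exactly when every missing char occurs in the scanned list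
theorem isInSegLoopB_char (l : List Char) (missing : PySem.Set Char) (h : missing ≠ []) :
    isInSegLoopB missing l = missing.all l.contains := by
  induction l generalizing missing with
  | nil =>
    obtain ⟨x, xs, rfl⟩ := List.exists_cons_of_ne_nil h
    simp [isInSegLoopB]
  | cons c rest ih =>
    simp only [isInSegLoopB]
    by_cases hm : (PySem.Set.discard missing c).isEmpty
    · simp only [hm, if_pos]
      have hall : missing.all (c :: rest).contains = true := by
        rw [List.all_eq_true]
        intro x hx
        have : x = c := by
          by_contra hne
          have : x ∈ PySem.Set.discard missing c := by
            rw [PySem.Set.mem_discard]; exact ⟨hx, hne⟩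
          rw [List.isEmpty_iff] at hm
          simp [hm] at this
        simp [this]
      rw [hall]
    · have hmne : PySem.Set.discard missing c ≠ [] := by
        intro he; rw [he] at hm; simp at hm
      simp only [hm, Bool.false_eq_true, if_false]
      rw [ih _ hmne]
      rw [Bool.eq_iff_iff, List.all_eq_true, List.all_eq_true]
      constructor
      · intro hd x hx
        by_cases hxc : x = c
        · simp [hxc]
        · have := hd x (by rw [PySem.Set.mem_discard]; exact ⟨hx, hxc⟩)
          simp only [List.contains_eq_mem, decide_eq_true_eq] at this ⊢
          exact List.mem_cons_of_mem _ this
      · intro hd x hx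
        rw [PySem.Set.mem_discard] at hx
        have := hd x hx.1
        simp only [List.contains_eq_mem, decide_eq_true_eq, List.mem_cons] at this ⊢
        tauto

-- ===== VERDICT (by name: the statement is the Claim_ definition above) =====
theorem isInSegment_spec : Claim_equal_isInSegment := by
  intro retseg otherseg _
  unfold Spec_isInSegment isInSegment isInSegment_alt
  by_cases ho : otherseg.toList = []
  · simp [ho, isInSegLoopA]
  · have hne : PySem.Set.ofList otherseg.toList ≠ [] := by
      obtain ⟨x, xs, he⟩ := List.exists_cons_of_ne_nil ho
      intro hc
      have : x ∈ PySem.Set.ofList otherseg.toList := by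
        rw [PySem.Set.mem_ofList]; simp [he]
      rw [hc] at this; simp at this
    rw [if_neg (by simp [ho]), isInSegLoopB_char _ _ hne]
    have := isInSegLoopA_char retseg.toList otherseg.toList 0
    rw [zero_add] at this
    rw [this]
    have hie : otherseg.toList.isEmpty = false := by simp [ho]
    rw [hie]
    simp only [Bool.not_false, Bool.true_and]
    rw [Bool.eq_iff_iff, List.all_eq_true, List.all_eq_true]
    constructor
    · intro h x hx; exact h x (by simpa [PySem.Set.mem_ofList] using hx)
    · intro h x hx; exact h x (by simpa [PySem.Set.mem_ofList] using hx)
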